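-- pv_equiv track=rewrite | github.com/lovis-heindrich/MGPS-project-selection | debug.py | diff_rec
-- ===== SOURCE A (Python) =====
-- def diff_rec(str1, str2):
--     if (len(str1) == 0) and (len(str2) == 0):
--         return 0
--     elif len(str1) == 0:
--         return sum([ord(c) for c in str2])
--     elif len(str2) == 0:
--         return sum([ord(c) for c in str1])
--     elif str1[0] == str2[0]:
--         return diff_rec(str1[1:], str2[1:])
--     else:
--         diff1 = ord(str1[0]) + diff_rec(str1[1:], str2)
--         diff2 = ord(str2[0]) + diff_rec(str1, str2[1:])
--         return min(diff1, diff2)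
-- ===== SOURCE B (Python) =====
-- def diff_rec(str1, str2):
--     n, m = len(str1), len(str2)
--     # row[j] = answer for (str1[i:], str2[j:]); start with i = n (empty suffix of str1)
--     row = [0] * (m + 1)
--     for j in range(m - 1, -1, -1):
--         row[j] = ord(str2[j]) + row[j + 1]
--     for i in range(n - 1, -1, -1):
--         new = [0] * (m + 1)
--         new[m] = ord(str1[i]) + row[m]
--         for j in range(m - 1, -1, -1):
--             if str1[i] == str2[j]:
--                 new[j] = row[j + 1]
--             else:
--                 new[j] = min(ord(str1[i]) + row[j], ord(str2[j]) + new[j + 1])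
--         row = new
--     return row[0]
-- ===== Notes on version B (the rewrite author's own statement) =====
-- stated objective: faster
-- what changed: Replaced the exponential two-branch recursion with a bottom-up dynamic program over suffix pairs keeping one row of the table; intended as faster (timing: A timed out at n=16 where B returned, so no ratio could be measured).
import Mathlib
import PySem

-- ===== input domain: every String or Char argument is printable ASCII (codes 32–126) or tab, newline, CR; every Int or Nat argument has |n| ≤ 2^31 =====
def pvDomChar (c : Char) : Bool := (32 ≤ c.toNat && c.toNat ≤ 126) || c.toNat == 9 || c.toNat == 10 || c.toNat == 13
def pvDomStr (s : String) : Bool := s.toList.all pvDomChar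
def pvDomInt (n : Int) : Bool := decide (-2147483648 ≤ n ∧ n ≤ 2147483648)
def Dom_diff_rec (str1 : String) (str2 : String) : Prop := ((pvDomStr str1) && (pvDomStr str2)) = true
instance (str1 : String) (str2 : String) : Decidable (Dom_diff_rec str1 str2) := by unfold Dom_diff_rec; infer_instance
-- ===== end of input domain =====

-- B replaces A's exponential two-branch recursion by a one-row bottom-up dynamic program
-- over suffix pairs; intended as faster (a timing run saw A time out at n=16 where B returned; no ratio was measurable).

-- ===== PORT A =====
-- A's recursion, transliterated over the strings' character lists; branches in A's order.
def diffRecCore : List Char → List Char → Int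
  | [], [] => 0
  | [], l2@(_ :: _) => (l2.map (fun c => (c.toNat : Int))).sum
  | l1@(_ :: _), [] => (l1.map (fun c => (c.toNat : Int))).sum
  | a :: t1, b :: t2 =>
    if a = b then diffRecCore t1 t2
    else
      let diff1 := (a.toNat : Int) + diffRecCore t1 (b :: t2)
      let diff2 := (b.toNat : Int) + diffRecCore (a :: t1) t2
      min diff1 diff2
  termination_by l1 l2 => l1.length + l2.length

def diff_rec (str1 : String) (str2 : String) : Int :=
  diffRecCore str1.toList str2.toList

-- ===== PORT B =====
-- Source B's first loop: row[j] = ord(str2[j]) + row[j+1], built from the back.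
def suffixSums (l : List Char) : List Int :=
  l.foldr (fun c r => ((c.toNat : Int) + r.headD 0) :: r) [0]

-- Source B's inner j-loop: build the new row for str1-suffix (a :: …) from the previous row,
-- back to front (new[m] = ord a + row[m] is the base case).
def stepRow (a : Char) : List Char → List Int → List Int
  | [], prev => [(a.toNat : Int) + prev.headD 0]
  | b :: t2, prev =>
    let rest := stepRow a t2 prev.tail
    if a = b then (prev.tail.headD 0) :: rest
    else (min ((a.toNat : Int) + prev.headD 0) ((b.toNat : Int) + rest.headD 0)) :: rest

def diff_rec_alt (str1 : String) (str2 : String) : Int :=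
  -- Source B's outer i-loop, from the back: fold over str1's characters.
  (str1.toList.foldr (fun a row => stepRow a str2.toList row) (suffixSums str2.toList)).headD 0

-- ===== PRECONDITION & SPEC =====
def Spec_diff_rec (str1 : String) (str2 : String) (out : Int) : Prop := out = diff_rec_alt str1 str2
instance (str1 : String) (str2 : String) (out : Int) : Decidable (Spec_diff_rec str1 str2 out) := by unfold Spec_diff_rec; infer_instance

-- ===== CLAIM (what is proved, stated in full; the proofs are below) =====
def Claim_equal_diff_rec : Prop := ∀ (str1 : String) (str2 : String), Dom_diff_rec str1 str2 → Spec_diff_rec str1 str2 (diff_rec str1 str2)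

-- ===== LEMMAS AND PROOFS =====

-- the intended contents of a DP row for str1-suffix s1: values at every str2-suffix
def rowSpec (s1 : List Char) : List Char → List Int
  | [] => [diffRecCore s1 []]
  | b :: t => diffRecCore s1 (b :: t) :: rowSpec s1 t

theorem diffRecCore_nil_left (l2 : List Char) :
    diffRecCore [] l2 = (l2.map (fun c => (c.toNat : Int))).sum := by
  cases l2 <;> simp [diffRecCore]

theorem diffRecCore_nil_right (l1 : List Char) :
    diffRecCore l1 [] = (l1.map (fun c => (c.toNat : Int))).sum := by
  cases l1 <;> simp [diffRecCore]

theorem rowSpec_headD (s1 l2 : List Char) :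
    (rowSpec s1 l2).headD 0 = diffRecCore s1 l2 := by
  cases l2 <;> simp [rowSpec]

theorem suffixSums_eq_rowSpec (l2 : List Char) : suffixSums l2 = rowSpec [] l2 := by
  induction l2 with
  | nil => simp [suffixSums, rowSpec, diffRecCore]
  | cons b t ih =>
    simp only [suffixSums, List.foldr] at *
    rw [ih, rowSpec_headD]
    simp [rowSpec, diffRecCore_nil_left]

theorem stepRow_rowSpec (a : Char) (t1 l2 : List Char) :
    stepRow a l2 (rowSpec t1 l2) = rowSpec (a :: t1) l2 := by
  induction l2 with
  | nil =>
    simp [stepRow, rowSpec, diffRecCore_nil_right]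
  | cons b t2 ih =>
    simp only [stepRow, rowSpec, List.tail_cons, ih, List.headD_cons, rowSpec_headD]
    by_cases h : a = b
    · subst h; simp [diffRecCore]
    · simp [diffRecCore, h]

theorem foldr_stepRow (l1 l2 : List Char) :
    l1.foldr (fun a row => stepRow a l2 row) (suffixSums l2) = rowSpec l1 l2 := by
  induction l1 with
  | nil => exact suffixSums_eq_rowSpec l2
  | cons a t1 ih => simp only [List.foldr, ih, stepRow_rowSpec]

-- ===== VERDICT (by name: the statement is the Claim_ definition above) =====
theorem diff_rec_spec : Claim_equal_diff_rec := by
  intro str1 str2 _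
  unfold Spec_diff_rec diff_rec diff_rec_alt
  rw [foldr_stepRow, rowSpec_headD]
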